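-- pv_equiv track=rewrite | github.com/kumarankit2594/DSA | List/FindIndexOfElementUsingStartIndex.py | firstIndexBetter
-- ===== SOURCE A (Python) =====
-- def firstIndexBetter(arr,x,si):
--     l = len(arr)
--     if si == l:
--         return -1
--     if arr[si] == x:
--         return si
--     smallerListOutput = firstIndexBetter(arr,x,si+1)
--     return smallerListOutput
-- ===== SOURCE B (Python) =====
-- def firstIndexBetter(arr, x, si):
--     i = si
--     n = len(arr)
--     while i != n:
--         if arr[i] == x:
--             return i
--         i += 1
--     return -1
-- ===== Notes on version B (the rewrite author's own statement) =====
-- stated objective: simpler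
-- what changed: Replaces the O(n)-deep tail recursion by an iterative while-loop scan with a single moving index (no call stack), preserving the exact indexing behaviour including negative start indices.
import Mathlib
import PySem

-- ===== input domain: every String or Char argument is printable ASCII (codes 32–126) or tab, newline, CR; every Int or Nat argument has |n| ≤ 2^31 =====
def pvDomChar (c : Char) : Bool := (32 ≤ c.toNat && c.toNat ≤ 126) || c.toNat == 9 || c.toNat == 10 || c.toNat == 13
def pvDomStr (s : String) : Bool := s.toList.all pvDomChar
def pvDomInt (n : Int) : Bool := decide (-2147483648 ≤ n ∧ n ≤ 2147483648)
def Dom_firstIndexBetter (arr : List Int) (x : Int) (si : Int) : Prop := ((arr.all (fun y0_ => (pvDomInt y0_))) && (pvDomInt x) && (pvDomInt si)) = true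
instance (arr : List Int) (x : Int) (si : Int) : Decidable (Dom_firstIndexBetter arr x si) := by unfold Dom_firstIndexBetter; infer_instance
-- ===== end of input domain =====

-- B replaces A's O(n)-deep tail recursion by an iterative single-index scan (simpler, O(1) space).


-- ===== PORT A =====
-- Recursive, exactly as A: base case si == len, check arr[si] (Python negative
-- indexing via pyGet?; none = IndexError, excluded by Pre_), else recurse on si+1.
def firstIndexBetter (arr : List Int) (x : Int) (si : Int) : Int :=
  let l : Int := arr.length
  if si = l then -1
  else
    match h : PySem.List.pyGet? arr si with
    | none => 0  -- IndexError in Python; outside Pre_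
    | some v =>
      if v = x then si
      else firstIndexBetter arr x (si + 1)
termination_by ((arr.length : Int) + 1 - si).toNat
decreasing_by
  have hin : PySem.Raise.InRange arr.length si := by
    by_contra hc
    rw [← PySem.List.pyGet?_eq_none_iff] at hc
    simp [hc] at h
  unfold PySem.Raise.InRange at hin
  omega

-- ===== PORT B =====
-- Iterative while-loop with a single moving index i; fuel bounds the number of
-- iterations (enough whenever the loop terminates; the `i = n` test is B's loop guard).
def pvAltLoop (arr : List Int) (x : Int) (n : Int) (fuel : Nat) (i : Int) : Int :=
  match fuel with
  | 0 => -1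
  | Nat.succ fuel' =>
    if i = n then -1
    else
      match PySem.List.pyGet? arr i with
      | none => 0  -- IndexError in Python; outside Pre_
      | some v => if v = x then i else pvAltLoop arr x n fuel' (i + 1)

def firstIndexBetter_alt (arr : List Int) (x : Int) (si : Int) : Int :=
  pvAltLoop arr x arr.length (((arr.length : Int) - si).toNat + 1) si

-- ===== PRECONDITION & SPEC =====
-- Pre_ excludes exactly the inputs where A raises IndexError: si outside [-len(arr), len(arr)].
def Pre_firstIndexBetter (arr : List Int) (x : Int) (si : Int) : Prop :=
  -(arr.length : Int) ≤ si ∧ si ≤ (arr.length : Int)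
instance (arr : List Int) (x : Int) (si : Int) : Decidable (Pre_firstIndexBetter arr x si) := by unfold Pre_firstIndexBetter; infer_instance
def pvWitness_firstIndexBetter : List Int × Int × Int := ([3, 1, 4, 1], 1, -3)

def Spec_firstIndexBetter (arr : List Int) (x : Int) (si : Int) (out : Int) : Prop := out = firstIndexBetter_alt arr x si
instance (arr : List Int) (x : Int) (si : Int) (out : Int) : Decidable (Spec_firstIndexBetter arr x si out) := by unfold Spec_firstIndexBetter; infer_instance

-- ===== CLAIM =====
def Claim_equal_firstIndexBetter : Prop := ∀ (arr : List Int) (x : Int) (si : Int), Dom_firstIndexBetter arr x si → Pre_firstIndexBetter arr x si → Spec_firstIndexBetter arr x si (firstIndexBetter arr x si)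

-- ===== LEMMAS AND PROOFS =====
theorem pvMain (arr : List Int) (x : Int) : ∀ (k : Nat) (si : Int),
    ((arr.length : Int) - si).toNat = k → -(arr.length : Int) ≤ si → si ≤ (arr.length : Int) →
    firstIndexBetter arr x si = pvAltLoop arr x arr.length (k + 1) si := by
  intro k
  induction k with
  | zero =>
    intro si hk _ hle
    have hsi : si = (arr.length : Int) := by omega
    rw [firstIndexBetter, pvAltLoop]
    simp [hsi]
  | succ k ih =>
    intro si hk hge hle
    have hlt : si < (arr.length : Int) := by omega
    have hin : PySem.Raise.InRange arr.length si := by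
      unfold PySem.Raise.InRange; omega
    have hsome : PySem.List.pyGet? arr si ≠ none := by
      intro hc
      rw [PySem.List.pyGet?_eq_none_iff] at hc
      exact hc hin
    obtain ⟨v, hv⟩ := Option.ne_none_iff_exists'.mp hsome
    have hrec := ih (si + 1) (by omega) (by omega) (by omega)
    rw [firstIndexBetter, pvAltLoop]
    have hne : ¬ si = ((arr.length : Int)) := by omega
    simp only [hne, if_false]
    split
    · next heq => rw [hv] at heq; cases heq
    · next w heq =>
      rw [hv] at heq; cases heq
      rw [hv]
      by_cases hvx : v = x
      · simp [hvx]
      · simp [hvx, hrec]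

-- ===== VERDICT =====
theorem firstIndexBetter_spec : Claim_equal_firstIndexBetter := by
  intro arr x si _ hpre
  unfold Spec_firstIndexBetter firstIndexBetter_alt
  exact pvMain arr x _ si rfl hpre.1 hpre.2
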